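-- pv_equiv track=rewrite | github.com/lionelvlv/spotify-downloader | modules/spotify_client.py | extract_playlist_id
-- ===== SOURCE A (Python) =====
-- def extract_playlist_id(url_or_id: str) -> str:
--     """
--     Extract playlist ID from URL or return ID if already extracted.
--
--     Args:
--         url_or_id: Spotify playlist URL or ID
--
--     Returns:
--         Playlist ID
--     """
--     # If it's already just an ID
--     if '/' not in url_or_id and '?' not in url_or_id:
--         return url_or_id
--
--     # Extract from URL
--     # Format: https://open.spotify.com/playlist/37i9dQZF1DXcBWIGoYBM5M?si=...
--     parts = url_or_id.split('/')
--
--     for i, part in enumerate(parts):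
--         if part == 'playlist' and i + 1 < len(parts):
--             playlist_id = parts[i + 1]
--             # Remove query parameters
--             playlist_id = playlist_id.split('?')[0]
--             return playlist_id
--
--     # If we can't extract it, assume it's already an ID
--     return url_or_id.split('?')[0]
-- ===== SOURCE B (Python) =====
-- def extract_playlist_id(url_or_id: str) -> str:
--     """
--     Extract playlist ID from URL or return ID if already extracted.
--
--     Args:
--         url_or_id: Spotify playlist URL or ID
--
--     Returns:
--         Playlist ID
--     """
--     # If it's already just an ID
--     if '/' not in url_or_id and '?' not in url_or_id:
--         return url_or_id
--
--     # Find the first exact 'playlist' path segment that has a successor: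
--     # prepending '/' makes every segment boundary (including the first
--     # segment) a '/', so that is exactly the first occurrence of '/playlist/'.
--     s = '/' + url_or_id
--     pos = s.find('/playlist/')
--     if pos != -1:
--         return s[pos + 10:].split('/')[0].split('?')[0]
--
--     # If we can't extract it, assume it's already an ID
--     return url_or_id.split('?')[0]
-- ===== Notes on version B (the rewrite author's own statement) =====
-- stated objective: idiomatic
-- what changed: Replaces A's split-on-'/' plus enumerate scan over segments with a single substring search: prepend '/' and take s.find('/playlist/'), whose first occurrence is exactly A's first 'playlist' segment with a successor.
import Mathlib
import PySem

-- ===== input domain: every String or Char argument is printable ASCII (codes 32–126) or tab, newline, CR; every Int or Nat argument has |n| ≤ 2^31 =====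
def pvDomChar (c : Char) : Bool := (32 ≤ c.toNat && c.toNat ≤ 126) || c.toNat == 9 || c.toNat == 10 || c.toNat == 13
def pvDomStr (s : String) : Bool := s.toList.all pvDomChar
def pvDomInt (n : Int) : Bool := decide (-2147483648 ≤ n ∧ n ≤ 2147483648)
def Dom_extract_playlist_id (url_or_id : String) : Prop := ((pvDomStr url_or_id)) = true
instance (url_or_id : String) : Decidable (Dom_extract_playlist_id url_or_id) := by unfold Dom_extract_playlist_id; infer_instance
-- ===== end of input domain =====

-- B replaces A's split-on-'/' + enumerate scan with one substring search for '/playlist/' in '/'+url (idiomatic; same cost).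

-- ===== PORT A =====
-- helper shared by both Pythons: x.split('?')[0]
def pvCutQ (cs : List Char) : List Char := (PySem.Chars.splitOn cs ['?']).headD []

def pvPlist : List Char := ['p', 'l', 'a', 'y', 'l', 'i', 's', 't']

-- the 'for i, part in enumerate(parts)' loop: 'i + 1 < len(parts)' = the rest is nonempty,
-- 'parts[i + 1]' = head of the rest
def pvLoopA : List (List Char) → Option (List Char)
  | [] => none
  | p :: rest =>
      if p = pvPlist ∧ rest ≠ [] then some (pvCutQ (rest.headD [])) else pvLoopA rest

def extract_playlist_id (url_or_id : String) : String :=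
  let cs := url_or_id.toList
  if !(PySem.Chars.isIn ['/'] cs) && !(PySem.Chars.isIn ['?'] cs) then url_or_id
  else
    match pvLoopA (PySem.Chars.splitOn cs ['/']) with
    | some r => String.mk r
    | none => String.mk (pvCutQ cs)

-- ===== PORT B =====
def pvPat : List Char := ['/', 'p', 'l', 'a', 'y', 'l', 'i', 's', 't', '/']

def extract_playlist_id_alt (url_or_id : String) : String :=
  let cs := url_or_id.toList
  if !(PySem.Chars.isIn ['/'] cs) && !(PySem.Chars.isIn ['?'] cs) then url_or_id
  else
    let s := '/' :: cs                     -- s = '/' + url_or_id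
    let pos := PySem.Chars.find s pvPat    -- s.find('/playlist/')
    if pos ≠ -1 then
      -- s[pos + 10:].split('/')[0].split('?')[0]
      String.mk (pvCutQ ((PySem.Chars.splitOn
        (PySem.Chars.slice s (some (pos + 10)) none) ['/']).headD []))
    else
      String.mk (pvCutQ cs)

-- ===== PRECONDITION & SPEC =====
def Spec_extract_playlist_id (url_or_id : String) (out : String) : Prop := out = extract_playlist_id_alt url_or_id
instance (url_or_id : String) (out : String) : Decidable (Spec_extract_playlist_id url_or_id out) := by unfold Spec_extract_playlist_id; infer_instance

-- ===== CLAIM (what is proved, stated in full; the proofs are below) =====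
def Claim_equal_extract_playlist_id : Prop := ∀ (url_or_id : String), Dom_extract_playlist_id url_or_id → Spec_extract_playlist_id url_or_id (extract_playlist_id url_or_id)

-- ===== LEMMAS AND PROOFS =====

-- segment view of splitting on '/'
def pvSegs : List Char → List (List Char)
  | [] => [[]]
  | c :: t =>
      if c = '/' then [] :: pvSegs t
      else
        match pvSegs t with
        | [] => [[c]]
        | q :: rest => (c :: q) :: rest

theorem pvSegs_ne_nil (l : List Char) : pvSegs l ≠ [] := by
  cases l with
  | nil => simp [pvSegs]
  | cons c t =>
      simp only [pvSegs]
      split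
      · simp
      · split <;> simp

theorem pvSegs_headD (l : List Char) : (pvSegs l).headD [] = l.takeWhile (· ≠ '/') := by
  induction l with
  | nil => simp [pvSegs]
  | cons c t ih =>
      simp only [pvSegs, List.takeWhile]
      by_cases hc : c = '/'
      · simp [hc]
      · simp only [hc, if_neg, decide_eq_true_eq]
        cases h : pvSegs t with
        | nil => exact absurd h (pvSegs_ne_nil t)
        | cons q rest =>
            simp [hc, h] at ih ⊢
            exact ih

theorem pvSegs_no_slash (l : List Char) (h : '/' ∉ l) : pvSegs l = [l] := by
  induction l with
  | nil => simp [pvSegs]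
  | cons c t ih =>
      simp only [List.mem_cons, not_or] at h
      have hc : c ≠ '/' := fun hh => h.1 hh.symm
      simp [pvSegs, hc, ih h.2]

theorem pvSegs_append (a r : List Char) (h : '/' ∉ a) :
    pvSegs (a ++ '/' :: r) = a :: pvSegs r := by
  induction a with
  | nil => simp [pvSegs]
  | cons c t ih =>
      simp only [List.mem_cons, not_or] at h
      have hc : c ≠ '/' := fun hh => h.1 hh.symm
      simp [pvSegs, hc, ih h.2]

-- splitOn with a one-char separator computes pvSegs
theorem pvSplitOn_go_eq (fuel : Nat) (l cur : List Char) (acc : List (List Char))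
    (hf : l.length ≤ fuel) :
    PySem.Chars.splitOn.go ['/'] fuel l cur acc =
      acc.reverse ++
        (match pvSegs l with
         | [] => [cur.reverse]
         | q :: rest => (cur.reverse ++ q) :: rest) := by
  induction fuel generalizing l cur acc with
  | zero =>
      have hl : l = [] := List.eq_nil_of_length_eq_zero (Nat.le_zero.mp hf)
      subst hl
      rw [PySem.Chars.splitOn.go.eq_def]
      simp [pvSegs]
  | succ n ih =>
      cases l with
      | nil =>
          rw [PySem.Chars.splitOn.go.eq_def]
          simp [pvSegs]
      | cons c t =>
          rw [PySem.Chars.splitOn.go.eq_def]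
          simp only [Nat.succ_eq_add_one]
          by_cases hc : c = '/'
          · have hpre : List.isPrefixOf ['/'] (c :: t) = true := by
              simp [List.isPrefixOf, hc]
            simp only [hpre, if_pos]
            have ht : t.length ≤ n := by simpa using Nat.succ_le_succ_iff.mp hf
            rw [show List.drop (List.length ['/']) (c :: t) = t by simp]
            rw [ih t [] (cur.reverse :: acc) ht]
            simp only [pvSegs, hc, if_pos rfl]
            cases h : pvSegs t with
            | nil => exact absurd h (pvSegs_ne_nil t)
            | cons q rest => simp
          · have hpre : List.isPrefixOf ['/'] (c :: t) = false := by
              simp [List.isPrefixOf, hc]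
              intro h; exact absurd h.symm hc
            simp only [hpre, Bool.false_eq_true, if_false]
            have ht : t.length ≤ n := by simpa using Nat.succ_le_succ_iff.mp hf
            rw [ih t (c :: cur) acc ht]
            simp only [pvSegs, hc, if_neg hc]
            cases h : pvSegs t with
            | nil => exact absurd h (pvSegs_ne_nil t)
            | cons q rest => simp

theorem pvSplitOn_eq_segs (cs : List Char) :
    PySem.Chars.splitOn cs ['/'] = pvSegs cs := by
  show PySem.Chars.splitOn.go ['/'] (cs.length + 1) cs [] [] = pvSegs cs
  rw [pvSplitOn_go_eq (cs.length + 1) cs [] [] (by omega)]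
  cases h : pvSegs cs with
  | nil => exact absurd h (pvSegs_ne_nil cs)
  | cons q rest => simp

-- position of the first occurrence of pvPat, as B's find walks the string
def pvBpos : List Char → Option Nat
  | [] => none
  | c :: t =>
      if pvPat.isPrefixOf (c :: t) then some 0 else (pvBpos t).map (· + 1)

theorem pvFind_go_eq (s : List Char) (k : Nat) :
    PySem.Chars.find.go pvPat s k =
      (match pvBpos s with
       | some p => ((k + p : Nat) : Int)
       | none => -1) := by
  induction s generalizing k with
  | nil =>
      rw [PySem.Chars.find.go.eq_1]
      simp [pvBpos, pvPat]
  | cons c t ih =>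
      rw [PySem.Chars.find.go.eq_2]
      by_cases hp : pvPat.isPrefixOf (c :: t)
      · simp [pvBpos, hp]
      · simp only [pvBpos, hp, Bool.false_eq_true, if_false]
        rw [ih (k + 1)]
        cases h : pvBpos t with
        | none => simp
        | some p => simp; push_cast; ring

theorem pvFind_eq (s : List Char) :
    PySem.Chars.find s pvPat =
      (match pvBpos s with
       | some p => (p : Int)
       | none => -1) := by
  show PySem.Chars.find.go pvPat s 0 = _
  rw [pvFind_go_eq s 0]
  cases h : pvBpos s <;> simp

-- B's core, as structural recursion on the searched string
def pvBcore : List Char → Option (List Char)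
  | [] => none
  | c :: t =>
      if pvPat.isPrefixOf (c :: t) then
        some (pvCutQ (((c :: t).drop 10).takeWhile (· ≠ '/')))
      else pvBcore t

theorem pvBcore_eq (s : List Char) :
    pvBcore s = (pvBpos s).map (fun p => pvCutQ ((s.drop (p + 10)).takeWhile (· ≠ '/'))) := by
  induction s with
  | nil => simp [pvBcore, pvBpos]
  | cons c t ih =>
      by_cases hp : pvPat.isPrefixOf (c :: t)
      · simp [pvBcore, pvBpos, hp]
      · simp only [pvBcore, pvBpos, hp, Bool.false_eq_true, if_false, ih, Option.map_map]
        cases h : pvBpos t with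
        | none => simp
        | some p =>
            simp only [Option.map_some]
            congr 1

theorem pvBcore_append (a s : List Char) (h : '/' ∉ a) :
    pvBcore (a ++ s) = pvBcore s := by
  induction a with
  | nil => simp
  | cons c t ih =>
      simp only [List.mem_cons, not_or] at h
      have hp : pvPat.isPrefixOf (c :: (t ++ s)) = false := by
        simp [pvPat, List.isPrefixOf]
        intro hc; exact absurd hc h.1
      simp only [List.cons_append, pvBcore, hp, Bool.false_eq_true, if_false]
      exact ih h.2

theorem pvSplit_first (cs : List Char) (h : '/' ∈ cs) :
    ∃ a r, cs = a ++ '/' :: r ∧ '/' ∉ a := by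
  induction cs with
  | nil => simp at h
  | cons c t ih =>
      by_cases hc : c = '/'
      · exact ⟨[], t, by simp [hc], by simp⟩
      · have ht : '/' ∈ t := by
          rcases List.mem_cons.mp h with h1 | h1
          · exact absurd h1.symm hc
          · exact h1
        obtain ⟨a, r, hr, ha⟩ := ih ht
        exact ⟨c :: a, r, by simp [hr], by simp [ha]; exact fun hh => hc hh.symm⟩

-- the main bridge: A's loop over the segments = B's scan of '/' + cs
theorem pvMain_aux (n : Nat) : ∀ cs : List Char, cs.length ≤ n →
    pvLoopA (pvSegs cs) = pvBcore ('/' :: cs) := by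
  induction n with
  | zero =>
      intro cs h
      have : cs = [] := List.eq_nil_of_length_eq_zero (Nat.le_zero.mp h)
      subst this; decide
  | succ n ih =>
      intro cs hlen
      by_cases hp : pvPat.isPrefixOf ('/' :: cs)
      · -- match at the front: cs = "playlist" ++ '/' :: r
        obtain ⟨rr, hrr⟩ := List.isPrefixOf_iff_prefix.mp hp
        have hrr' : ('/' : Char) :: ((pvPlist ++ ['/']) ++ rr) = '/' :: cs := by
          simpa [pvPat, pvPlist] using hrr
        have hcs : cs = pvPlist ++ '/' :: rr := by
          have h2 := (List.cons.injEq _ _ _ _).mp hrr'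
          simpa using h2.2.symm
        rw [hcs]
        rw [pvSegs_append pvPlist rr (by decide)]
        have h1 : pvLoopA (pvPlist :: pvSegs rr) = some (pvCutQ ((pvSegs rr).headD [])) := by
          simp [pvLoopA, pvSegs_ne_nil rr]
        rw [h1, pvSegs_headD rr]
        have hb : pvBcore ('/' :: cs) =
            some (pvCutQ ((('/' :: cs).drop 10).takeWhile (· ≠ '/'))) := by
          simp only [pvBcore]
          rw [if_pos hp]
        rw [hcs] at hb
        rw [hb]
        congr 2
      · -- no match at the front
        have hb : pvBcore ('/' :: cs) = pvBcore cs := by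
          rw [pvBcore, if_neg (by simpa using hp)]
        rw [hb]
        by_cases hs : '/' ∈ cs
        · obtain ⟨a, r, hcs, ha⟩ := pvSplit_first cs hs
          have hane : a ≠ pvPlist := by
            intro hae
            apply hp
            rw [hcs, hae]
            exact List.isPrefixOf_iff_prefix.mpr ⟨r, by simp [pvPat, pvPlist]⟩
          rw [hcs, pvSegs_append a r ha]
          simp only [pvLoopA]
          rw [if_neg (by simp [hane])]
          have hr : r.length ≤ n := by
            rw [hcs] at hlen; simp at hlen; omega
          rw [ih r hr]
          rw [pvBcore_append a ('/' :: r) ha]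
        · rw [pvSegs_no_slash cs hs]
          simp only [pvLoopA]
          rw [if_neg (by simp)]
          have : pvBcore cs = pvBcore ([] : List Char) := by
            have := pvBcore_append cs [] hs
            simpa using this
          simp [pvLoopA, this, pvBcore]

theorem pvMain (cs : List Char) : pvLoopA (pvSegs cs) = pvBcore ('/' :: cs) :=
  pvMain_aux cs.length cs le_rfl

-- ===== VERDICT (by name: the statement is the Claim_ definition above) =====
theorem extract_playlist_id_spec : Claim_equal_extract_playlist_id := by
  intro u _
  unfold Spec_extract_playlist_id extract_playlist_id extract_playlist_id_alt
  simp only []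
  by_cases hg : (!(PySem.Chars.isIn ['/'] u.toList) && !(PySem.Chars.isIn ['?'] u.toList)) = true
  · simp [hg]
  · simp only [hg, Bool.false_eq_true, if_false]
    rw [pvSplitOn_eq_segs, pvMain, pvBcore_eq, pvFind_eq]
    cases h : pvBpos ('/' :: u.toList) with
    | none => simp
    | some p =>
        have hne : ((p : Int) ≠ -1) := by omega
        simp only [Option.map_some, hne, ne_eq, not_false_iff, if_pos]
        rw [show ((p : Int) + 10) = ((p + 10 : Nat) : Int) by push_cast; ring]
        rw [PySem.Chars.slice_eq_listSlice, PySem.List.slice_from_natCast]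
        rw [pvSplitOn_eq_segs, pvSegs_headD]
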